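-- pv_equiv track=rewrite | github.com/erenersarac10/legalnewest | backend/parsers/diffing/clause_differ.py | _analyze_paragraph_changes
-- ===== SOURCE A (Python) =====
-- from typing import Dict, List, Any, Optional, Tuple, Set
--
-- def _analyze_paragraph_changes(
--     old_paragraphs: List[str], new_paragraphs: List[str]
-- ) -> Tuple[List[int], List[int], List[int]]:
--     """Analyze changes at paragraph level"""
--     added = []
--     deleted = []
--     modified = []
--
--     # Simple implementation: compare by index
--     max_len = max(len(old_paragraphs), len(new_paragraphs))
--
--     for i in range(max_len):
--         old_para = old_paragraphs[i] if i < len(old_paragraphs) else None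
--         new_para = new_paragraphs[i] if i < len(new_paragraphs) else None
--
--         if old_para is None and new_para is not None:
--             added.append(i)
--         elif old_para is not None and new_para is None:
--             deleted.append(i)
--         elif old_para != new_para:
--             modified.append(i)
--
--     return added, deleted, modified
-- ===== SOURCE B (Python) =====
-- def _analyze_paragraph_changes(old_paragraphs, new_paragraphs):
--     """Analyze changes at paragraph level: one pass over the common prefix
--     for modifications, then the tails as index ranges."""
--     min_len = min(len(old_paragraphs), len(new_paragraphs))
--     modified = [i for i, (o, n) in enumerate(zip(old_paragraphs, new_paragraphs)) if o != n]
--     added = list(range(min_len, len(new_paragraphs)))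
--     deleted = list(range(min_len, len(old_paragraphs)))
--     return added, deleted, modified
-- ===== Notes on version B (the rewrite author's own statement) =====
-- stated objective: simpler
-- what changed: Replaces the single max-length loop with per-index bounds checks and a three-way branch by a zip/enumerate pass over the common prefix for 'modified' plus two closed-form range tails for 'added'/'deleted'.
import Mathlib
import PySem

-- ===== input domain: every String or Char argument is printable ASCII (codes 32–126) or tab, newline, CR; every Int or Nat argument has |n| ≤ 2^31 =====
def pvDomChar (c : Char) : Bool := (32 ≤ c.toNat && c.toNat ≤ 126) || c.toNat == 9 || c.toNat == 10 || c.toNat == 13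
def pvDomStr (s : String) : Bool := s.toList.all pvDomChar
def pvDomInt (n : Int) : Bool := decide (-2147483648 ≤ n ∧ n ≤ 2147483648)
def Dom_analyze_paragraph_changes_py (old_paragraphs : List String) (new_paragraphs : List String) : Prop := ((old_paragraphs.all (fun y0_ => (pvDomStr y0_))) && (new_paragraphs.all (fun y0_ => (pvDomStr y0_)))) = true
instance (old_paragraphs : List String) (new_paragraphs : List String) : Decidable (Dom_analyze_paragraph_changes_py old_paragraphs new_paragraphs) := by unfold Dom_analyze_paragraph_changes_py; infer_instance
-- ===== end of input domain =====

-- B replaces A's single max-length loop (bounds checks + 3-way branch at every index) by a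
-- common-prefix pass for 'modified' and two closed-form range tails for 'added'/'deleted' (simpler).

-- ===== PORT A =====
def analyze_paragraph_changes_py (old_paragraphs : List String) (new_paragraphs : List String) : List Int × List Int × List Int :=
  let max_len : Int := max (PySem.List.len old_paragraphs) (PySem.List.len new_paragraphs)
  (PySem.List.pyRange 0 max_len 1).foldl
    (fun (s : List Int × List Int × List Int) i =>
      let old_para : Option String := if i < PySem.List.len old_paragraphs then PySem.List.pyGet? old_paragraphs i else none
      let new_para : Option String := if i < PySem.List.len new_paragraphs then PySem.List.pyGet? new_paragraphs i else none
      if old_para = none ∧ new_para ≠ none then (s.1 ++ [i], s.2.1, s.2.2)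
      else if old_para ≠ none ∧ new_para = none then (s.1, s.2.1 ++ [i], s.2.2)
      else if old_para ≠ new_para then (s.1, s.2.1, s.2.2 ++ [i])
      else s)
    ([], [], [])

-- ===== PORT B =====
def analyze_paragraph_changes_py_alt (old_paragraphs : List String) (new_paragraphs : List String) : List Int × List Int × List Int :=
  let min_len : Int := min (PySem.List.len old_paragraphs) (PySem.List.len new_paragraphs)
  let modified : List Int :=
    (PySem.List.enumerate (old_paragraphs.zip new_paragraphs) 0).filterMap
      (fun p => if p.2.1 ≠ p.2.2 then some p.1 else none)
  let added : List Int := PySem.List.pyRange min_len (PySem.List.len new_paragraphs) 1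
  let deleted : List Int := PySem.List.pyRange min_len (PySem.List.len old_paragraphs) 1
  (added, deleted, modified)

-- ===== PRECONDITION & SPEC =====
def Spec_analyze_paragraph_changes_py (old_paragraphs : List String) (new_paragraphs : List String) (out : List Int × List Int × List Int) : Prop := out = analyze_paragraph_changes_py_alt old_paragraphs new_paragraphs
instance (old_paragraphs : List String) (new_paragraphs : List String) (out : List Int × List Int × List Int) : Decidable (Spec_analyze_paragraph_changes_py old_paragraphs new_paragraphs out) := by unfold Spec_analyze_paragraph_changes_py; infer_instance

-- ===== CLAIM (what is proved, stated in full; the proofs are below) =====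
def Claim_equal_analyze_paragraph_changes_py : Prop := ∀ (old_paragraphs : List String) (new_paragraphs : List String), Dom_analyze_paragraph_changes_py old_paragraphs new_paragraphs → Spec_analyze_paragraph_changes_py old_paragraphs new_paragraphs (analyze_paragraph_changes_py old_paragraphs new_paragraphs)

-- ===== LEMMAS AND PROOFS =====

-- 'old_paragraphs[i] if i < len(old_paragraphs) else None', abstracted for the proofs
def pvAt (xs : List String) (i : Int) : Option String :=
  if i < PySem.List.len xs then PySem.List.pyGet? xs i else none

theorem pvAt_eq_none_iff (xs : List String) (i : Int) (hi : 0 ≤ i) :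
    pvAt xs i = none ↔ (xs.length : Int) ≤ i := by
  unfold pvAt
  split_ifs with h
  · simp only [PySem.List.len_eq] at h
    rw [PySem.List.pyGet?_eq_some_getElem xs hi h]
    simp; omega
  · simp only [PySem.List.len_eq] at h
    simp; omega

theorem pvAt_eq_some (xs : List String) (i : Int) (hi : 0 ≤ i) (hlt : i < (xs.length : Int)) :
    pvAt xs i = some (xs.getD i.toNat "") := by
  unfold pvAt
  rw [if_pos (by simpa using hlt), PySem.List.pyGet?_eq_some_getElem xs hi hlt]
  rw [List.getD_eq_getElem _ _ (by omega)]

-- filtering an arithmetic window out of range(0, M)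
theorem pv_filter_window (a b M : Int) (ha : 0 ≤ a) (hbM : b ≤ M) (hab : a ≤ b) :
    (PySem.List.pyRange 0 M 1).filter (fun i => decide (a ≤ i ∧ i < b)) =
      PySem.List.pyRange a b 1 := by
  rw [PySem.List.pyRange_one_append 0 a M ha (by omega),
      PySem.List.pyRange_one_append a b M hab hbM, List.filter_append, List.filter_append]
  rw [List.filter_eq_nil_iff.mpr (by intro x hx; rw [PySem.List.mem_pyRange_one] at hx; simp; omega),
      List.filter_eq_self.mpr (by intro x hx; rw [PySem.List.mem_pyRange_one] at hx; simp; omega),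
      List.filter_eq_nil_iff.mpr (by intro x hx; rw [PySem.List.mem_pyRange_one] at hx; simp; omega)]
  simp

theorem pv_filter_window_nil (a b M : Int) (hab : b ≤ a) :
    (PySem.List.pyRange 0 M 1).filter (fun i => decide (a ≤ i ∧ i < b)) = [] := by
  apply List.filter_eq_nil_iff.mpr
  intro x hx
  simp; omega


def pvG1 (o n : List String) : List Int → Int → List Int :=
  fun a i => if pvAt o i = none ∧ pvAt n i ≠ none then a ++ [i] else a
def pvG2 (o n : List String) : List Int → Int → List Int :=
  fun a i => if pvAt o i ≠ none ∧ pvAt n i = none then a ++ [i] else a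
def pvG3 (o n : List String) : List Int → Int → List Int :=
  fun a i => if pvAt o i ≠ none ∧ pvAt n i ≠ none ∧ pvAt o i ≠ pvAt n i then a ++ [i] else a

-- A's three-way branch is, componentwise, three independent conditional appends
theorem pv_body_eq (o n : List String) (s : List Int × List Int × List Int) (i : Int) :
    (if pvAt o i = none ∧ pvAt n i ≠ none then (s.1 ++ [i], s.2.1, s.2.2)
     else if pvAt o i ≠ none ∧ pvAt n i = none then (s.1, s.2.1 ++ [i], s.2.2)
     else if pvAt o i ≠ pvAt n i then (s.1, s.2.1, s.2.2 ++ [i])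
     else s)
    = (pvG1 o n s.1 i, pvG2 o n s.2.1 i, pvG3 o n s.2.2 i) := by
  unfold pvG1 pvG2 pvG3
  rcases ho : pvAt o i with _ | x <;> rcases hn : pvAt n i with _ | y <;> simp_all
  split_ifs <;> simp_all

theorem pv_foldl_split (o n : List String) (M : Int) :
    (PySem.List.pyRange 0 M 1).foldl
      (fun (s : List Int × List Int × List Int) i =>
        if pvAt o i = none ∧ pvAt n i ≠ none then (s.1 ++ [i], s.2.1, s.2.2)
        else if pvAt o i ≠ none ∧ pvAt n i = none then (s.1, s.2.1 ++ [i], s.2.2)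
        else if pvAt o i ≠ pvAt n i then (s.1, s.2.1, s.2.2 ++ [i])
        else s) ([], [], [])
    = ((PySem.List.pyRange 0 M 1).foldl (pvG1 o n) [],
       (PySem.List.pyRange 0 M 1).foldl (pvG2 o n) [],
       (PySem.List.pyRange 0 M 1).foldl (pvG3 o n) []) := by
  have hb : (fun (s : List Int × List Int × List Int) (i : Int) =>
        if pvAt o i = none ∧ pvAt n i ≠ none then (s.1 ++ [i], s.2.1, s.2.2)
        else if pvAt o i ≠ none ∧ pvAt n i = none then (s.1, s.2.1 ++ [i], s.2.2)
        else if pvAt o i ≠ pvAt n i then (s.1, s.2.1, s.2.2 ++ [i])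
        else s)
      = fun s i => (pvG1 o n s.1 i, (fun (t : List Int × List Int) (j : Int) => (pvG2 o n t.1 j, pvG3 o n t.2 j)) s.2 i) := by
    funext s i; exact pv_body_eq o n s i
  rw [hb, PySem.List.foldl_prod_mk (f := pvG1 o n)
        (g := fun (t : List Int × List Int) (j : Int) => (pvG2 o n t.1 j, pvG3 o n t.2 j)),
      PySem.List.foldl_prod_mk (f := pvG2 o n) (g := pvG3 o n)]

theorem pv_added (o n : List String) :
    (PySem.List.pyRange 0 (max (o.length : Int) (n.length : Int)) 1).foldl (pvG1 o n) []
      = PySem.List.pyRange (min (o.length : Int) (n.length : Int)) (n.length : Int) 1 := by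
  unfold pvG1
  rw [PySem.List.foldl_append_ite_eq_filter (fun i => pvAt o i = none ∧ pvAt n i ≠ none)]
  rw [List.nil_append,
      List.filter_congr (q := fun i => decide ((o.length : Int) ≤ i ∧ i < (n.length : Int)))
        (by intro x hx
            rw [PySem.List.mem_pyRange_one] at hx
            simp only [decide_eq_decide]
            rw [pvAt_eq_none_iff o x hx.1]
            constructor
            · rintro ⟨h1, h2⟩
              refine ⟨h1, ?_⟩
              by_contra hlt
              exact h2 ((pvAt_eq_none_iff n x hx.1).mpr (by omega))
            · rintro ⟨h1, h2⟩
              refine ⟨h1, fun hc => ?_⟩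
              have := (pvAt_eq_none_iff n x hx.1).mp hc; omega)]
  by_cases hle : (o.length : Int) ≤ (n.length : Int)
  · rw [pv_filter_window _ _ _ (by omega) (by omega) hle]
    congr 1; omega
  · rw [pv_filter_window_nil _ _ _ (by omega)]
    rw [show min (o.length : Int) (n.length : Int) = (n.length : Int) by omega,
        PySem.List.pyRange_one_eq_nil (by omega)]

theorem pv_deleted (o n : List String) :
    (PySem.List.pyRange 0 (max (o.length : Int) (n.length : Int)) 1).foldl (pvG2 o n) []
      = PySem.List.pyRange (min (o.length : Int) (n.length : Int)) (o.length : Int) 1 := by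
  unfold pvG2
  rw [PySem.List.foldl_append_ite_eq_filter (fun i => pvAt o i ≠ none ∧ pvAt n i = none)]
  rw [List.nil_append,
      List.filter_congr (q := fun i => decide ((n.length : Int) ≤ i ∧ i < (o.length : Int)))
        (by intro x hx
            rw [PySem.List.mem_pyRange_one] at hx
            simp only [decide_eq_decide]
            rw [pvAt_eq_none_iff n x hx.1]
            constructor
            · rintro ⟨h1, h2⟩
              refine ⟨h2, ?_⟩
              by_contra hlt
              exact h1 ((pvAt_eq_none_iff o x hx.1).mpr (by omega))
            · rintro ⟨h1, h2⟩
              refine ⟨fun hc => ?_, h1⟩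
              have := (pvAt_eq_none_iff o x hx.1).mp hc; omega)]
  by_cases hle : (n.length : Int) ≤ (o.length : Int)
  · rw [pv_filter_window _ _ _ (by omega) (by omega) hle]
    congr 1; omega
  · rw [pv_filter_window_nil _ _ _ (by omega)]
    rw [show min (o.length : Int) (n.length : Int) = (o.length : Int) by omega,
        PySem.List.pyRange_one_eq_nil (by omega)]

theorem pv_modified (o n : List String) :
    (PySem.List.pyRange 0 (max (o.length : Int) (n.length : Int)) 1).foldl (pvG3 o n) []
      = (PySem.List.enumerate (o.zip n)).filterMap
          (fun p => if p.2.1 ≠ p.2.2 then some p.1 else none) := by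
  unfold pvG3
  rw [PySem.List.foldl_append_ite_eq_filter
        (fun i => pvAt o i ≠ none ∧ pvAt n i ≠ none ∧ pvAt o i ≠ pvAt n i), List.nil_append]
  -- RHS: enumerate over the zip is a map over range(0, min)
  rw [PySem.List.enumerate_eq_map_pyRange (o.zip n) ("", ""), List.filterMap_map]
  have hzlen : ((o.zip n).length : Int) = min (o.length : Int) (n.length : Int) := by
    rw [List.length_zip]; omega
  rw [show ((fun (p : Int × String × String) => if p.2.1 ≠ p.2.2 then some p.1 else none) ∘
        fun j => (j, PySem.List.pyGetD (o.zip n) j ("", "")))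
      = Option.guard (fun j : Int =>
          ((PySem.List.pyGetD (o.zip n) j ("", "")).1 ≠ (PySem.List.pyGetD (o.zip n) j ("", "")).2 : Bool)) from by
        funext j; simp [Option.guard, Function.comp]]
  rw [List.filterMap_eq_filter]
  -- both sides are filters over ranges; split the left range at min
  rw [PySem.List.len_eq, hzlen]
  rw [PySem.List.pyRange_one_append 0 (min (o.length : Int) (n.length : Int))
        (max (o.length : Int) (n.length : Int)) (by omega) (by omega), List.filter_append]
  have hnil : List.filter (fun x => decide (pvAt o x ≠ none ∧ pvAt n x ≠ none ∧ pvAt o x ≠ pvAt n x))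
      (PySem.List.pyRange (min (o.length : Int) (n.length : Int))
        (max (o.length : Int) (n.length : Int)) 1) = [] := List.filter_eq_nil_iff.mpr (by
        intro x hx
        rw [PySem.List.mem_pyRange_one] at hx
        simp only [decide_eq_true_eq, not_and, not_not]
        intro h1 h2
        exfalso
        have h1' := (pvAt_eq_none_iff o x (by omega))
        have h2' := (pvAt_eq_none_iff n x (by omega))
        by_cases h : (o.length : Int) ≤ x
        · exact h1 (h1'.mpr h)
        · by_cases h3 : (n.length : Int) ≤ x
          · exact h2 (h2'.mpr h3)
          · omega)
  rw [hnil, List.append_nil]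
  apply List.filter_congr
  intro x hx
  rw [PySem.List.mem_pyRange_one] at hx
  have hxo : x < (o.length : Int) := by omega
  have hxn : x < (n.length : Int) := by omega
  have hxz : x < (((o.zip n).length : Nat) : Int) := by rw [hzlen]; omega
  rw [pvAt_eq_some o x hx.1 hxo, pvAt_eq_some n x hx.1 hxn,
      PySem.List.pyGetD_eq_getElem (o.zip n) ("", "") hx.1 hxz]
  have hgz : (o.zip n)[x.toNat]'(by omega) =
      (o[x.toNat]'(by omega), n[x.toNat]'(by omega)) := List.getElem_zip
  rw [hgz]
  simp only [decide_eq_decide]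
  rw [List.getD_eq_getElem _ _ (by omega), List.getD_eq_getElem _ _ (by omega)]
  simp

theorem pv_main (o n : List String) :
    analyze_paragraph_changes_py o n = analyze_paragraph_changes_py_alt o n := by
  show (PySem.List.pyRange 0 (max (PySem.List.len o) (PySem.List.len n)) 1).foldl
      (fun (s : List Int × List Int × List Int) i =>
        if pvAt o i = none ∧ pvAt n i ≠ none then (s.1 ++ [i], s.2.1, s.2.2)
        else if pvAt o i ≠ none ∧ pvAt n i = none then (s.1, s.2.1 ++ [i], s.2.2)
        else if pvAt o i ≠ pvAt n i then (s.1, s.2.1, s.2.2 ++ [i])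
        else s) ([], [], [])
    = (PySem.List.pyRange (min (PySem.List.len o) (PySem.List.len n)) (PySem.List.len n) 1,
       PySem.List.pyRange (min (PySem.List.len o) (PySem.List.len n)) (PySem.List.len o) 1,
       (PySem.List.enumerate (o.zip n)).filterMap (fun p => if p.2.1 ≠ p.2.2 then some p.1 else none))
  rw [pv_foldl_split]
  simp only [PySem.List.len_eq]
  rw [pv_added, pv_deleted, pv_modified]

-- ===== VERDICT (by name: the statement is the Claim_ definition above) =====
theorem analyze_paragraph_changes_py_spec : Claim_equal_analyze_paragraph_changes_py := by
  intro o n _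
  unfold Spec_analyze_paragraph_changes_py
  exact pv_main o n
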